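-- pv_equiv track=rewrite | github.com/OscarBarreraGithub/autonomousIBP | tools/reference-harness/scripts/qualification_readiness.py | infer_optional_capture_packet
-- ===== SOURCE A (Python) =====
-- from typing import Any
--
-- def infer_optional_capture_packet(
--     benchmark_ids: list[str],
--     phase0_by_id: dict[str, dict[str, Any]],
-- ) -> str:
--     packet_ids = {
--         phase0_by_id[benchmark_id]["optional_capture_packet"]
--         for benchmark_id in benchmark_ids
--         if phase0_by_id[benchmark_id]["optional_capture_packet"]
--     }
--     if len(packet_ids) == 1:
--         return next(iter(packet_ids))
--     return ""
-- ===== SOURCE B (Python) =====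
-- def infer_optional_capture_packet(benchmark_ids, phase0_by_id):
--     candidate = None
--     multiple = False
--     for benchmark_id in benchmark_ids:
--         value = phase0_by_id[benchmark_id]["optional_capture_packet"]
--         if value:
--             if candidate is None:
--                 candidate = value
--             elif value != candidate:
--                 multiple = True
--     return candidate if candidate is not None and not multiple else ""
-- ===== Notes on version B (the rewrite author's own statement) =====
-- stated objective: simpler
-- what changed: Replaces the set comprehension plus len==1/next(iter) dance with a single scan keeping a scalar candidate and a 'multiple' flag, so no set is built at all.
import Mathlib
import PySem

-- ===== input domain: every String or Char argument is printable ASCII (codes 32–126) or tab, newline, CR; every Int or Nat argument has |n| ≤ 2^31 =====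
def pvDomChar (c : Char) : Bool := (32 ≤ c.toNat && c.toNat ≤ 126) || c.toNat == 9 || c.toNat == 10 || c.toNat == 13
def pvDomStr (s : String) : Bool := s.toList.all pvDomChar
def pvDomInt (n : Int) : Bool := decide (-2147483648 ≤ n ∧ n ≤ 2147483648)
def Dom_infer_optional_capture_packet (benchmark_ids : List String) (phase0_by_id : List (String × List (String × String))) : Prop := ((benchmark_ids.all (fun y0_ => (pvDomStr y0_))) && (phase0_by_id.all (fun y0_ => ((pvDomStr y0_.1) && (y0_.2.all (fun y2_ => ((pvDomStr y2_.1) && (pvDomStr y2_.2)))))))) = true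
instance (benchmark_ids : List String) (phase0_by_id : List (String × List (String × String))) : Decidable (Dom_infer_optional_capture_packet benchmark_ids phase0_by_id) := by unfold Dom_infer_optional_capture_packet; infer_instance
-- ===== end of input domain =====

-- B replaces A's set comprehension + len==1/next(iter) read-out with a single scan keeping a
-- scalar candidate and a 'multiple' flag (objective: simpler; no set is built).

-- shared lookup: phase0_by_id[benchmark_id]["optional_capture_packet"]
-- (none exactly where Python raises KeyError at either level)
def pvLookup (phase0_by_id : List (String × List (String × String))) (benchmark_id : String) : Option String :=
  match (PySem.Dict.mk phase0_by_id).get? benchmark_id with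
  | none => none
  | some inner => (PySem.Dict.mk inner).get? "optional_capture_packet"

-- ===== PORT A =====
-- one step of A's set comprehension: add the value if it is truthy (non-empty)
def pvStepA (phase0_by_id : List (String × List (String × String))) (s : PySem.Set String) (benchmark_id : String) : PySem.Set String :=
  let v := (pvLookup phase0_by_id benchmark_id).getD ""
  if v ≠ "" then PySem.Set.add s v else s

def infer_optional_capture_packet (benchmark_ids : List String) (phase0_by_id : List (String × List (String × String))) : String :=
  let packet_ids : PySem.Set String := benchmark_ids.foldl (pvStepA phase0_by_id) PySem.Set.empty
  if packet_ids.length = 1 then packet_ids.headD "" else ""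

-- ===== PORT B =====
-- one step of B's loop over (candidate, multiple)
def pvStepB (phase0_by_id : List (String × List (String × String))) (st : Option String × Bool) (benchmark_id : String) : Option String × Bool :=
  let v := (pvLookup phase0_by_id benchmark_id).getD ""
  if v = "" then st
  else
    match st.1 with
    | none => (some v, st.2)
    | some c => if v = c then st else (st.1, true)

-- final read-out: candidate if set and not multiple, else ""
def pvReadB (st : Option String × Bool) : String :=
  match st with
  | (some c, false) => c
  | _ => ""

def infer_optional_capture_packet_alt (benchmark_ids : List String) (phase0_by_id : List (String × List (String × String))) : String :=
  pvReadB (benchmark_ids.foldl (pvStepB phase0_by_id) (none, false))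

-- ===== PRECONDITION & SPEC =====
-- Pre_ excludes exactly the inputs where Python A raises KeyError: some benchmark_id (or the
-- "optional_capture_packet" key of its record) is missing from phase0_by_id.
def Pre_infer_optional_capture_packet (benchmark_ids : List String) (phase0_by_id : List (String × List (String × String))) : Prop :=
  ∀ benchmark_id ∈ benchmark_ids, (pvLookup phase0_by_id benchmark_id).isSome = true
instance (benchmark_ids : List String) (phase0_by_id : List (String × List (String × String))) : Decidable (Pre_infer_optional_capture_packet benchmark_ids phase0_by_id) := by unfold Pre_infer_optional_capture_packet; infer_instance

def pvWitness_infer_optional_capture_packet : List String × (List (String × List (String × String))) :=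
  (["a", "b"], [("a", [("optional_capture_packet", "p1")]), ("b", [("optional_capture_packet", "")])])

def Spec_infer_optional_capture_packet (benchmark_ids : List String) (phase0_by_id : List (String × List (String × String))) (out : String) : Prop := out = infer_optional_capture_packet_alt benchmark_ids phase0_by_id
instance (benchmark_ids : List String) (phase0_by_id : List (String × List (String × String))) (out : String) : Decidable (Spec_infer_optional_capture_packet benchmark_ids phase0_by_id out) := by unfold Spec_infer_optional_capture_packet; infer_instance

-- ===== CLAIM (what is proved, stated in full; the proofs are below) =====
def Claim_equal_infer_optional_capture_packet : Prop := ∀ (benchmark_ids : List String) (phase0_by_id : List (String × List (String × String))), Dom_infer_optional_capture_packet benchmark_ids phase0_by_id → Pre_infer_optional_capture_packet benchmark_ids phase0_by_id → Spec_infer_optional_capture_packet benchmark_ids phase0_by_id (infer_optional_capture_packet benchmark_ids phase0_by_id)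

-- ===== LEMMAS AND PROOFS =====

-- Invariant tying A's set to B's (candidate, multiple) state after any number of loop steps:
-- the candidate is the set's first element (if any) and 'multiple' says the set has ≥ 2 elements.
def pvInv (s : PySem.Set String) (st : Option String × Bool) : Prop :=
  s.Nodup ∧ st.1 = s.head? ∧ st.2 = decide (2 ≤ s.length)

theorem pvInv_step (ph : List (String × List (String × String))) (benchmark_id : String)
    (s : PySem.Set String) (st : Option String × Bool) (h : pvInv s st) :
    pvInv (pvStepA ph s benchmark_id) (pvStepB ph st benchmark_id) := by
  obtain ⟨c, m⟩ := st
  obtain ⟨hnd, hc, hm⟩ := h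
  simp only at hc hm
  unfold pvStepA pvStepB
  set v := (pvLookup ph benchmark_id).getD "" with hv0
  by_cases hv : v = ""
  · simp only [hv, ne_eq, not_true_eq_false, if_false, if_true]
    exact ⟨hnd, hc, hm⟩
  · simp only [hv, ne_eq, not_false_eq_true, if_true, if_false]
    cases c with
    | none =>
      cases s with
      | cons a t => simp [List.head?] at hc
      | nil =>
        rw [PySem.Set.add_of_not_mem (by simp)]
        simp only [List.length_nil] at hm
        refine ⟨List.nodup_singleton v, rfl, ?_⟩
        simp at hm ⊢
        omega
    | some c0 =>
      cases s with
      | nil => simp [List.head?] at hc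
      | cons a t =>
        simp only [List.head?, Option.some.injEq] at hc
        subst hc
        show pvInv _ (if v = c0 then (some c0, m) else (some c0, true))
        by_cases hmem : v ∈ c0 :: t
        · rw [PySem.Set.add_of_mem hmem]
          by_cases hva : v = c0
          · rw [if_pos hva]; exact ⟨hnd, rfl, hm⟩
          · rw [if_neg hva]
            have h2 : 2 ≤ (c0 :: t).length := by
              have ht : v ∈ t := by
                rcases List.mem_cons.mp hmem with h | h
                · exact absurd h hva
                · exact h
              have := List.length_pos_of_mem ht
              simp only [List.length_cons]; omega
            exact ⟨hnd, rfl, (decide_eq_true h2).symm⟩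
        · rw [PySem.Set.add_of_not_mem hmem]
          have hva : v ≠ c0 := fun h => hmem (h ▸ List.mem_cons_self ..)
          rw [if_neg hva]
          refine ⟨?_, by simp, ?_⟩
          · simp only [List.nodup_cons, List.mem_cons, not_or] at hnd hmem
            simp [List.nodup_append, hnd.1, hnd.2]
            refine ⟨fun h => hmem.1 h.symm, fun x hx h => hmem.2 (h ▸ hx)⟩
          · simp only [List.length_append, List.length_cons]
            simp

theorem pvInv_foldl (ids : List String) (ph : List (String × List (String × String)))
    (s : PySem.Set String) (st : Option String × Bool) (h : pvInv s st) :
    pvInv (ids.foldl (pvStepA ph) s) (ids.foldl (pvStepB ph) st) := by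
  induction ids generalizing s st with
  | nil => exact h
  | cons x xs ih =>
    simp only [List.foldl_cons]
    exact ih _ _ (pvInv_step ph x s st h)

-- the two post-loop read-outs agree under the invariant
theorem pvFinal (s : PySem.Set String) (st : Option String × Bool) (h : pvInv s st) :
    (if s.length = 1 then s.headD "" else "") = pvReadB st := by
  obtain ⟨c, m⟩ := st
  obtain ⟨_, hc, hm⟩ := h
  simp only at hc hm
  unfold pvReadB
  cases s with
  | nil =>
    simp only [List.head?] at hc
    simp only [List.length_nil] at hm
    simp at hm
    subst hc; subst hm
    simp
  | cons a t =>
    simp only [List.head?] at hc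
    subst hc
    cases t with
    | nil =>
      simp only [List.length_cons, List.length_nil] at hm
      have : m = false := by rw [hm]; simp
      subst this
      simp
    | cons b u =>
      have : m = true := by rw [hm]; simp only [List.length_cons]; simp
      subst this
      simp only [List.length_cons]
      rw [if_neg (by omega)]

-- ===== VERDICT (by name: the statement is the Claim_ definition above) =====
theorem infer_optional_capture_packet_spec : Claim_equal_infer_optional_capture_packet := by
  intro ids ph _ _
  exact pvFinal _ _ (pvInv_foldl ids ph PySem.Set.empty (none, false) ⟨List.nodup_nil, rfl, rfl⟩)
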